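-- pv_equiv track=rewrite | github.com/pwright/skupperance | refine.py | filter_help_text
-- ===== SOURCE A (Python) =====
-- def filter_help_text(help_text):
--     """Remove the 'Global Flags' section from the help text."""
--     lines = help_text.split("\n")
--     filtered_lines = []
--     skip = False
--
--     for line in lines:
--         if line.strip().startswith("Global Flags:"):
--             skip = True
--         if not skip:
--             filtered_lines.append(line)
--         if skip and line.strip() == "":
--             skip = False  # Stop skipping after a blank line (end of the section)
--
--     return "\n".join(filtered_lines).strip()
-- ===== SOURCE B (Python) =====
-- def filter_help_text(help_text):
--     """Remove the 'Global Flags' section from the help text."""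
--     it = iter(help_text.split("\n"))
--     kept = []
--     for line in it:
--         if line.strip().startswith("Global Flags:"):
--             for line in it:
--                 if line.strip() == "":
--                     break
--         else:
--             kept.append(line)
--     return "\n".join(kept).strip()
-- ===== Notes on version B (the rewrite author's own statement) =====
-- stated objective: alternative
-- what changed: Replaces A's single flat pass carrying a persistent skip boolean with a nested-loop traversal over one shared iterator: an inner loop consumes the Global Flags section up to and including its terminating blank line, so no flag state survives between lines.
import Mathlib
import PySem

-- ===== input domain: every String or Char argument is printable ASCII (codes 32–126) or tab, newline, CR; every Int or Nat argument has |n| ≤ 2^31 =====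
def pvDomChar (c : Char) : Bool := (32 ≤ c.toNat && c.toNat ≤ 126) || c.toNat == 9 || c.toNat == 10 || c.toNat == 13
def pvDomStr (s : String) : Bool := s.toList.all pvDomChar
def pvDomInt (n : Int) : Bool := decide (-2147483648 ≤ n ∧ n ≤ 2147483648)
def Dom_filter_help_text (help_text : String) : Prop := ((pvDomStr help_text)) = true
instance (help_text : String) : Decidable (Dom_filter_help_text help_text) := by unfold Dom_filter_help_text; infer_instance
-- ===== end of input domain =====

-- B replaces A's carried boolean skip-flag with a nested loop over one shared iterator
-- (inner loop consumes the Global Flags section); same return value, objective: alternative decomposition.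

-- ===== PORT A =====
-- loop body of A's for-loop: state = (filtered_lines, skip)
def pvAStep (st : List String × Bool) (line : String) : List String × Bool :=
  let skip := if PySem.Str.startswith (PySem.Str.strip line) "Global Flags:" then true else st.2
  let filtered := if !skip then st.1 ++ [line] else st.1
  let skip := if skip && (PySem.Str.strip line == "") then false else skip
  (filtered, skip)

def filter_help_text (help_text : String) : String :=
  let lines := (PySem.Str.split? help_text "\n").getD []
  let r := lines.foldl pvAStep ([], false)
  PySem.Str.strip (PySem.Str.join "\n" r.1)

-- ===== PORT B =====
-- inner 'for line in it: if line.strip() == "": break' — consume up to and including the blank line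
def pvDropSection : List String → List String
  | [] => []
  | l :: rest => if PySem.Str.strip l == "" then rest else pvDropSection rest

theorem pvDropSection_length_le (xs : List String) : (pvDropSection xs).length ≤ xs.length := by
  induction xs with
  | nil => simp [pvDropSection]
  | cons l rest ih =>
    simp only [pvDropSection]
    split
    · simp
    · exact Nat.le_succ_of_le ih

-- outer 'for line in it'
def pvKeep : List String → List String
  | [] => []
  | l :: rest =>
    if PySem.Str.startswith (PySem.Str.strip l) "Global Flags:" then
      pvKeep (pvDropSection rest)
    else
      l :: pvKeep rest
termination_by xs => xs.length
decreasing_by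
  · exact Nat.lt_succ_of_le (pvDropSection_length_le rest)
  · simp

def filter_help_text_alt (help_text : String) : String :=
  PySem.Str.strip (PySem.Str.join "\n" (pvKeep ((PySem.Str.split? help_text "\n").getD [])))

-- ===== PRECONDITION & SPEC =====
def Spec_filter_help_text (help_text : String) (out : String) : Prop := out = filter_help_text_alt help_text
instance (help_text : String) (out : String) : Decidable (Spec_filter_help_text help_text out) := by unfold Spec_filter_help_text; infer_instance

-- ===== CLAIM (what is proved, stated in full; the proofs are below) =====
def Claim_equal_filter_help_text : Prop := ∀ (help_text : String), Dom_filter_help_text help_text → Spec_filter_help_text help_text (filter_help_text help_text)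

-- ===== LEMMAS AND PROOFS =====

-- a line whose strip starts with "Global Flags:" is not blank after strip
theorem pv_header_not_blank (l : String)
    (h : PySem.Str.startswith (PySem.Str.strip l) "Global Flags:" = true) :
    (PySem.Str.strip l == "") = false := by
  by_contra hc
  have he : PySem.Str.strip l = "" := by
    cases hq : (PySem.Str.strip l == "") with
    | true => exact eq_of_beq hq
    | false => exact absurd hq hc
  rw [he] at h
  simp [PySem.Str.startswith, PySem.Chars.startswith] at h

-- main invariant: A's fold with skip = false computes pvKeep, with skip = true it first drops the section
theorem pv_main (n : Nat) : ∀ lines : List String, lines.length ≤ n →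
    (∀ acc, (List.foldl pvAStep (acc, false) lines).1 = acc ++ pvKeep lines) ∧
    (∀ acc, (List.foldl pvAStep (acc, true) lines).1 = acc ++ pvKeep (pvDropSection lines)) := by
  induction n with
  | zero =>
    intro lines hl
    have : lines = [] := List.eq_nil_of_length_eq_zero (Nat.le_zero.mp hl)
    subst this
    simp [pvKeep, pvDropSection]
  | succ n ih =>
    intro lines hl
    cases lines with
    | nil => simp [pvKeep, pvDropSection]
    | cons l rest =>
      have hr : rest.length ≤ n := Nat.le_of_succ_le_succ hl
      constructor
      · intro acc
        by_cases hh : PySem.Str.startswith (PySem.Str.strip l) "Global Flags:" = true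
        · have hb := pv_header_not_blank l hh
          simp only [List.foldl_cons, pvAStep, hh, hb, if_true, Bool.true_and,
            Bool.not_true, Bool.false_eq_true, if_false]
          rw [(ih rest hr).2 acc, show pvKeep (l :: rest) = pvKeep (pvDropSection rest) by rw [pvKeep, if_pos hh]]
        · simp only [List.foldl_cons, pvAStep, hh, if_false, Bool.not_false, if_true,
            Bool.false_and, Bool.false_eq_true]
          rw [(ih rest hr).1 (acc ++ [l]), show pvKeep (l :: rest) = l :: pvKeep rest by rw [pvKeep, if_neg hh]]
          simp
      · intro acc
        have hsk : (if PySem.Str.startswith (PySem.Str.strip l) "Global Flags:" then true else true) = true := by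
          split <;> rfl
        by_cases hb : (PySem.Str.strip l == "") = true
        · simp only [List.foldl_cons, pvAStep, hsk, hb, Bool.true_and, if_true,
            Bool.not_true, Bool.false_eq_true, if_false]
          rw [(ih rest hr).1 acc, show pvDropSection (l :: rest) = rest by rw [pvDropSection, if_pos hb]]
        · simp only [List.foldl_cons, pvAStep, hsk, Bool.true_and, hb,
            Bool.not_true, Bool.false_eq_true, if_false]
          rw [(ih rest hr).2 acc, show pvDropSection (l :: rest) = pvDropSection rest by rw [pvDropSection, if_neg hb]]

-- ===== VERDICT (by name: the statement is the Claim_ definition above) =====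
theorem filter_help_text_spec : Claim_equal_filter_help_text := by
  intro help_text _
  unfold Spec_filter_help_text filter_help_text filter_help_text_alt
  have h := (pv_main ((PySem.Str.split? help_text "\n").getD []).length
      ((PySem.Str.split? help_text "\n").getD []) le_rfl).1 []
  simp only [List.nil_append] at h
  simp only [h]
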